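-- pv_equiv track=rewrite | github.com/markbroich/coding_challenges_example_solutions | coding_challenges_example_solutions/contiguous_subarrays/ContiguousSubarrays.py | count_subarrays_brute_forth
-- ===== SOURCE A (Python) =====
-- def count_subarrays_brute_forth(arr):
--     output = ['']*len(arr)
--     for i in range(len(arr)):
--         counter = 1
--         current = arr[i]
--         #go left
--         for j in range(i-1,-1,-1):
--             #if neighbor is higher: stop
--             if arr[j] > current:
--                 break
--             else:
--                 counter +=1
--         #go right
--         for j in range(i+1, len(arr)):
--             #if neighbor is higher: stop
--             if arr[j] > current:
--                 break
--             else: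
--                 counter +=1
--         output[i] = counter
--     return output
-- ===== SOURCE B (Python) =====
-- def count_subarrays_brute_forth(arr):
--     # Amortized O(n) "span with jumps": spans[i] = 1 + number of consecutive
--     # elements <= a[i] immediately to the left; jump by previously computed spans.
--     def spans(a):
--         n = len(a)
--         s = [0] * n
--         for i in range(n):
--             c = 1
--             j = i - 1
--             while j >= 0 and a[j] <= a[i]:
--                 c += s[j]
--                 j -= s[j]
--             s[i] = c
--         return s
--     left = spans(arr)
--     right = spans(arr[::-1])[::-1]
--     return [left[i] + right[i] - 1 for i in range(len(arr))]
-- ===== Notes on version B (the rewrite author's own statement) =====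
-- stated objective: faster
-- what changed: Replaces the per-index left/right rescans with an amortized-O(n) span DP: each index's left span is computed by jumping over previously computed spans, and the right spans come from running the same pass on the reversed array.
import Mathlib
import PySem

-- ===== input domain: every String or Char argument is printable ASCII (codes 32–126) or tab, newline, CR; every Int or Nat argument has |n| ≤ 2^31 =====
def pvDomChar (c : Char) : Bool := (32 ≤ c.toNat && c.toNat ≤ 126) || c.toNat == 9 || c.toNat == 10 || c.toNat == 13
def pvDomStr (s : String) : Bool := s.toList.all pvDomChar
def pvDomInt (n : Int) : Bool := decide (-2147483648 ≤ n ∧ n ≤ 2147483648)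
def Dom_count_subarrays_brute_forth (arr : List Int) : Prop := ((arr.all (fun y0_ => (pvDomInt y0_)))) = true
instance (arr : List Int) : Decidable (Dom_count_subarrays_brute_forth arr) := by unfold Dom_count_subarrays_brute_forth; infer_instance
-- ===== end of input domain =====

-- B replaces A's per-index left/right rescans (O(n^2)) by an amortized-O(n) span DP
-- (jump over previously computed spans; right spans via the same pass on the reversed list).

-- ===== PORT A =====
-- A's inner loops: scan neighbours (left loop sees reversed prefix, right loop the suffix),
-- counting while the neighbour is not greater than `cur`, stopping at the first greater one.
def pvScanA (cur : Int) : List Int → Int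
  | [] => 0
  | x :: xs => if x > cur then 0 else 1 + pvScanA cur xs

def count_subarrays_brute_forth (arr : List Int) : List Int :=
  (List.range arr.length).map (fun i =>
    let current := arr.getD i 0
    1 + pvScanA current ((arr.take i).reverse) + pvScanA current (arr.drop (i + 1)))

-- ===== PORT B =====
-- Source B's inner `while j >= 0 and a[j] <= a[i]` loop; fuel bounds the iteration count
-- (j strictly decreases each step, so fuel = i suffices) and is otherwise inert.
def pvWhileB (a s : List Int) (x : Int) : Nat → Int → Int → Int
  | 0, _, c => c
  | f + 1, j, c =>
    if 0 ≤ j ∧ (PySem.List.pyGet? a j).getD 0 ≤ x then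
      pvWhileB a s x f (j - (PySem.List.pyGet? s j).getD 0) (c + (PySem.List.pyGet? s j).getD 0)
    else c

-- Source B's `spans` helper: for each i, jump leftwards over earlier spans.
def pvSpansB (a : List Int) : List Int :=
  (List.range a.length).foldl
    (fun s i => s ++ [pvWhileB a s (a.getD i 0) i ((i : Int) - 1) 1]) []

def count_subarrays_brute_forth_alt (arr : List Int) : List Int :=
  let left := pvSpansB arr
  let right := (pvSpansB arr.reverse).reverse
  (List.range arr.length).map (fun i => left.getD i 0 + right.getD i 0 - 1)

-- ===== PRECONDITION & SPEC =====
def Spec_count_subarrays_brute_forth (arr : List Int) (out : List Int) : Prop := out = count_subarrays_brute_forth_alt arr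
instance (arr : List Int) (out : List Int) : Decidable (Spec_count_subarrays_brute_forth arr out) := by unfold Spec_count_subarrays_brute_forth; infer_instance

-- ===== CLAIM (what is proved, stated in full; the proofs are below) =====
def Claim_equal_count_subarrays_brute_forth : Prop := ∀ (arr : List Int), Dom_count_subarrays_brute_forth arr → Spec_count_subarrays_brute_forth arr (count_subarrays_brute_forth arr)

-- ===== LEMMAS AND PROOFS =====

-- the count both programs are about: length of the run of elements ≤ a[i] just left of i
def pvCnt (a : List Int) (i : Nat) : Nat :=
  (((a.take i).reverse).takeWhile (fun y => y ≤ a.getD i 0)).length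

theorem pvScanA_eq_takeWhile (cur : Int) (l : List Int) :
    pvScanA cur l = ((l.takeWhile (fun y => y ≤ cur)).length : Int) := by
  induction l with
  | nil => simp [pvScanA]
  | cons x xs ih =>
    by_cases h : x > cur
    · simp [pvScanA, List.takeWhile_cons, h, not_le.mpr h]
    · simp [pvScanA, List.takeWhile_cons, h, not_lt.mp h, ih]
      omega

theorem pv_takeWhile_len_le {p : Int → Bool} (l : List Int) :
    (l.takeWhile p).length ≤ l.length :=
  (List.takeWhile_prefix p).length_le

theorem pv_takeWhile_split {p : Int → Bool} (l1 l2 : List Int) (h : ∀ y ∈ l1, p y) :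
    (l1 ++ l2).takeWhile p = l1 ++ l2.takeWhile p := by
  induction l1 with
  | nil => simp
  | cons x xs ih =>
    simp only [List.cons_append, List.takeWhile_cons, h x (by simp)]
    simp [ih (fun y hy => h y (by simp [hy]))]

theorem pv_mem_takeWhile {p : Int → Bool} {l : List Int} {y : Int}
    (h : y ∈ l.takeWhile p) : p y := List.mem_takeWhile_imp h

theorem pv_drop_takeWhile (p : Int → Bool) (l : List Int) :
    l.drop (l.takeWhile p).length = l.dropWhile p := by
  induction l with
  | nil => simp
  | cons x xs ih =>
    by_cases h : p x
    · simp [List.takeWhile_cons, List.dropWhile_cons, h, ih]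
    · simp [List.takeWhile_cons, List.dropWhile_cons, h]

-- main loop lemma: with correct earlier spans, the jump loop computes the takeWhile length
theorem pvWhileB_eq (a s : List Int) (x : Int) :
    ∀ jj : Nat, ∀ fuel c, jj ≤ fuel → jj ≤ a.length → jj ≤ s.length →
    (∀ k, k < jj → s.getD k 0 = 1 + (pvCnt a k : Int)) →
    pvWhileB a s x fuel ((jj : Int) - 1) c
      = c + (((a.take jj).reverse.takeWhile (fun y => y ≤ x)).length : Int) := by
  intro jj
  induction jj using Nat.strong_induction_on with
  | _ jj ih =>
    intro fuel c hfuel ha hs hinv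
    match jj, hfuel with
    | 0, _ =>
      cases fuel <;> simp [pvWhileB]
    | m + 1, hfuel =>
      obtain ⟨f, rfl⟩ : ∃ f, fuel = f + 1 := ⟨fuel - 1, by omega⟩
      rw [show (((m + 1 : Nat) : Int) - 1) = ((m : Int) + 1 - 1) from by push_cast; ring]
      have hm : m < a.length := by omega
      have hms : m < s.length := by omega
      have hga : PySem.List.pyGet? a (((m : Int) + 1) - 1) = some (a.getD m 0) := by
        simp [PySem.List.pyGet?, PySem.List.pyIdx?, hm, List.getD_eq_getElem a 0 hm]
      have htake : (a.take (m + 1)).reverse = a.getD m 0 :: (a.take m).reverse := by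
        rw [List.take_succ]
        simp [List.getElem?_eq_getElem hm, List.getD_eq_getElem a 0 hm]
      by_cases hcmp : a.getD m 0 ≤ x
      · -- loop body runs: jump by s[m] = 1 + pvCnt a m
        have hgs : PySem.List.pyGet? s (((m : Int) + 1) - 1) = some (s.getD m 0) := by
          simp [PySem.List.pyGet?, PySem.List.pyIdx?, hms, List.getD_eq_getElem s 0 hms]
        have hsm : s.getD m 0 = 1 + (pvCnt a m : Int) := hinv m (by omega)
        have htlen : pvCnt a m ≤ m := by
          have := pv_takeWhile_len_le (p := fun y => y ≤ a.getD m 0) ((a.take m).reverse)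
          simpa [pvCnt, List.length_take, Nat.min_eq_left (le_of_lt hm)] using this
        set t := pvCnt a m with ht
        have hstep : pvWhileB a s x (f + 1) ((m : Int) + 1 - 1) c
            = pvWhileB a s x f (((m - t : Nat) : Int) - 1) (c + (1 + (t : Int))) := by
          simp only [pvWhileB, hga, hgs, Option.getD_some]
          rw [if_pos ⟨by omega, hcmp⟩, hsm]
          congr 1
          push_cast [Nat.cast_sub htlen]
          ring
        rw [hstep, ih (m - t) (by omega) f (c + (1 + (t : Int))) (by omega) (by omega) (by omega)
          (fun k hk => hinv k (by omega))]
        -- now compute the RHS takeWhile length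
        have hall : ∀ y ∈ ((a.take m).reverse.takeWhile (fun y => y ≤ a.getD m 0)), (fun y => decide (y ≤ x)) y = true := by
          intro y hy
          have h1 := pv_mem_takeWhile hy
          simp only [decide_eq_true_eq] at h1 ⊢
          omega
        have hsplit : (a.take m).reverse
            = (a.take m).reverse.takeWhile (fun y => y ≤ a.getD m 0)
              ++ (a.take (m - t)).reverse := by
          have hdw : (a.take m).reverse.dropWhile (fun y => y ≤ a.getD m 0)
              = (a.take m).reverse.drop t :=
            (pv_drop_takeWhile (fun y => y ≤ a.getD m 0) ((a.take m).reverse)).symm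
          have hdrop : (a.take m).reverse.drop t = (a.take (m - t)).reverse := by
            rw [List.drop_reverse]
            congr 1
            rw [List.length_take, Nat.min_eq_left (le_of_lt hm), List.take_take]
            congr 1
            omega
          conv_lhs => rw [← List.takeWhile_append_dropWhile
            (p := fun y => y ≤ a.getD m 0) (l := (a.take m).reverse)]
          rw [hdw, hdrop]
        rw [htake]
        conv_rhs => rw [hsplit]
        rw [List.takeWhile_cons, if_pos (by simpa using hcmp),
          pv_takeWhile_split _ _ hall]
        simp [pvCnt] at ht ⊢
        push_cast
        omega
      · -- neighbour greater: loop stops, takeWhile is empty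
        have : pvWhileB a s x (f + 1) ((m : Int) + 1 - 1) c = c := by
          simp only [pvWhileB, hga, Option.getD_some]
          rw [if_neg (by tauto)]
        rw [this, htake, List.takeWhile_cons, if_neg (by simpa using hcmp)]
        simp
  termination_by jj => jj

-- spans invariant: pvSpansB a has length n and entry k = 1 + pvCnt a k
theorem pvSpansB_inv (a : List Int) :
    ∀ n, n ≤ a.length →
    ((List.range n).foldl (fun s i => s ++ [pvWhileB a s (a.getD i 0) i ((i : Int) - 1) 1]) []).length = n ∧
    (∀ k, k < n →
      ((List.range n).foldl (fun s i => s ++ [pvWhileB a s (a.getD i 0) i ((i : Int) - 1) 1]) []).getD k 0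
        = 1 + (pvCnt a k : Int)) := by
  intro n
  induction n with
  | zero => simp
  | succ m ih =>
    intro hm
    obtain ⟨hlen, hval⟩ := ih (by omega)
    set s := (List.range m).foldl (fun s i => s ++ [pvWhileB a s (a.getD i 0) i ((i : Int) - 1) 1]) [] with hsdef
    have hnew : pvWhileB a s (a.getD m 0) m ((m : Int) - 1) 1 = 1 + (pvCnt a m : Int) := by
      rw [pvWhileB_eq a s (a.getD m 0) m m 1 (le_refl m) (by omega) (by omega) hval]
      rfl
    rw [List.range_succ, List.foldl_append, List.foldl_cons, List.foldl_nil, ← hsdef]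
    refine ⟨?_, ?_⟩
    · rw [List.length_append, hlen]
      rfl
    · intro k hk
      rcases Nat.lt_or_ge k m with hkm | hkm
      · rw [List.getD_append _ _ _ _ (by omega)]
        exact hval k hkm
      · have hkeq : k = m := by omega
        subst hkeq
        rw [List.getD_append_right _ _ _ _ (by omega), hlen, Nat.sub_self]
        simpa using hnew

theorem pvSpansB_len (a : List Int) : (pvSpansB a).length = a.length :=
  (pvSpansB_inv a a.length (le_refl _)).1

theorem pvSpansB_getD (a : List Int) (k : Nat) (hk : k < a.length) :
    (pvSpansB a).getD k 0 = 1 + (pvCnt a k : Int) :=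
  (pvSpansB_inv a a.length (le_refl _)).2 k hk

-- the reversed-array spans give the right-side counts
theorem pvCnt_reverse (a : List Int) (i : Nat) (hi : i < a.length) :
    pvCnt a.reverse (a.length - 1 - i)
      = ((a.drop (i + 1)).takeWhile (fun y => y ≤ a.getD i 0)).length := by
  have h1 : (a.reverse.take (a.length - 1 - i)).reverse = a.drop (i + 1) := by
    rw [List.take_reverse, List.reverse_reverse]
    congr 1
    omega
  have h2 : a.reverse.getD (a.length - 1 - i) 0 = a.getD i 0 := by
    have hlt : a.length - 1 - i < a.reverse.length := by simp; omega
    rw [List.getD_eq_getElem _ _ hlt, List.getElem_reverse, List.getD_eq_getElem a 0 (by omega)]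
    congr 1
    omega
  rw [pvCnt, h1, h2]

theorem pv_right_getD (a : List Int) (i : Nat) (hi : i < a.length) :
    ((pvSpansB a.reverse).reverse).getD i 0
      = 1 + (((a.drop (i + 1)).takeWhile (fun y => y ≤ a.getD i 0)).length : Int) := by
  have hlen : (pvSpansB a.reverse).length = a.length := by simp [pvSpansB_len]
  have hlt : i < (pvSpansB a.reverse).reverse.length := by simp [hlen]; exact hi
  rw [List.getD_eq_getElem _ _ hlt, List.getElem_reverse,
    ← List.getD_eq_getElem _ 0 (by simp [hlen]; omega)]
  rw [hlen, pvSpansB_getD a.reverse (a.length - 1 - i) (by simp; omega),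
    pvCnt_reverse a i hi]

-- ===== VERDICT (by name: the statement is the Claim_ definition above) =====
theorem count_subarrays_brute_forth_spec : Claim_equal_count_subarrays_brute_forth := by
  intro arr _
  unfold Spec_count_subarrays_brute_forth count_subarrays_brute_forth count_subarrays_brute_forth_alt
  apply List.map_congr_left
  intro i hi
  have hi' : i < arr.length := List.mem_range.mp hi
  dsimp only
  rw [pvScanA_eq_takeWhile, pvScanA_eq_takeWhile,
    pvSpansB_getD arr i hi', pv_right_getD arr i hi']
  simp [pvCnt]
  push_cast
  ring
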